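-- pv_equiv track=rewrite | github.com/voidiz/solutions | aoc/2023/day13/day13.py | check_ref
-- ===== SOURCE A (Python) =====
-- def check_ref(i, j, lines, n, fixed=False):
--     if i < 0 or j >= n:
--         # we must have fixed to complete
--         return fixed
--
--     l1 = lines[i]
--     l2 = lines[j]
--
--     changed = False
--     for c in range(len(l1)):
--         if l1[c] == l2[c]:
--             continue
--
--         # cant change if fixed or changed earlier
--         if fixed or changed:
--             return False
--
--         changed = True
--
--     return check_ref(i - 1, j + 1, lines, n, fixed or changed)
-- ===== SOURCE B (Python) =====
-- def check_ref(i, j, lines, n, fixed=False):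
--     diffs = 1 if fixed else 0
--     while i >= 0 and j < n:
--         l1 = lines[i]
--         l2 = lines[j]
--         for c in range(len(l1)):
--             if l1[c] != l2[c]:
--                 diffs += 1
--                 if diffs > 1:
--                     return False
--         i -= 1
--         j += 1
--     return diffs == 1
-- ===== Notes on version B (the rewrite author's own statement) =====
-- stated objective: simpler
-- what changed: Replaced the recursion-with-fixed-flag by an iterative while loop that counts total character mismatches in a single diffs accumulator (seeded with 1 when fixed) and finally tests diffs == 1.
import Mathlib
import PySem

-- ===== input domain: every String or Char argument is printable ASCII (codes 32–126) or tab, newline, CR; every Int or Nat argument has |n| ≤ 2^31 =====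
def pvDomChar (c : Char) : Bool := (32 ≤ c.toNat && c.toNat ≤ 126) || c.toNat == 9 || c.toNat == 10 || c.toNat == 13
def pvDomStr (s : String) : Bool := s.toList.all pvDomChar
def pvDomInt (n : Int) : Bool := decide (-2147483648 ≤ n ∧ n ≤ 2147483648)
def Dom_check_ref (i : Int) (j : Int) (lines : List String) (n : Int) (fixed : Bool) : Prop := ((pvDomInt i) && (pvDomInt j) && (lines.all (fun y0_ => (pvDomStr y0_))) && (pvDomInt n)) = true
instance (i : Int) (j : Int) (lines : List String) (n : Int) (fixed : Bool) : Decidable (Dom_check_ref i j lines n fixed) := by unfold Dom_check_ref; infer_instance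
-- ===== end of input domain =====

-- B replaces A's recursion-with-fixed-flag by an iterative loop counting mismatches in one accumulator (simpler decomposition, same cost).


-- ===== PORT A =====
-- the 'for c in range(len(l1))' loop of A: none = IndexError on l2[c]; .error b = early 'return b'; .ok changed = loop completed
def scanA (l1 l2 : List Char) (c : Int) (fixed changed : Bool) : Option (Except Bool Bool) :=
  match l1 with
  | [] => some (.ok changed)
  | ch :: rest =>
    match PySem.List.pyGet? l2 c with
    | none => none
    | some ch2 =>
      if ch == ch2 then scanA rest l2 (c + 1) fixed changed
      else if fixed || changed then some (.error false)
      else scanA rest l2 (c + 1) fixed true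

def check_ref (i : Int) (j : Int) (lines : List String) (n : Int) (fixed : Bool) : Bool :=
  if i < 0 || n ≤ j then fixed
  else
    match PySem.List.pyGet? lines i, PySem.List.pyGet? lines j with
    | some l1, some l2 =>
      match scanA l1.toList l2.toList 0 fixed false with
      | some (.ok changed) => check_ref (i - 1) (j + 1) lines n (fixed || changed)
      | some (.error b) => b
      | none => false      -- Python raises IndexError here (excluded by Pre_)
    | _, _ => false        -- Python raises IndexError here (excluded by Pre_)
termination_by (i + 1).toNat
decreasing_by simp at *; omega

-- ===== PORT B =====
-- the inner 'for c in range(len(l1))' of B: none = IndexError; .error b = early 'return b'; .ok d = final diffs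
def countB (l1 l2 : List Char) (c : Int) (diffs : Int) : Option (Except Bool Int) :=
  match l1 with
  | [] => some (.ok diffs)
  | ch :: rest =>
    match PySem.List.pyGet? l2 c with
    | none => none
    | some ch2 =>
      if ch == ch2 then countB rest l2 (c + 1) diffs
      else if diffs + 1 > 1 then some (.error false)
      else countB rest l2 (c + 1) (diffs + 1)

-- the 'while i >= 0 and j < n' loop of B
def loopB (i : Int) (j : Int) (lines : List String) (n : Int) (diffs : Int) : Bool :=
  if 0 ≤ i && j < n then
    match PySem.List.pyGet? lines i with
    | none => false        -- Python raises IndexError here (excluded by Pre_)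
    | some l1 =>
      match PySem.List.pyGet? lines j with
      | none => false      -- Python raises IndexError here (excluded by Pre_)
      | some l2 =>
        match countB l1.toList l2.toList 0 diffs with
        | some (.ok d) => loopB (i - 1) (j + 1) lines n d
        | some (.error b) => b
        | none => false    -- Python raises IndexError here (excluded by Pre_)
  else diffs == 1
termination_by (i + 2).toNat
decreasing_by simp at *; omega

def check_ref_alt (i : Int) (j : Int) (lines : List String) (n : Int) (fixed : Bool) : Bool :=
  loopB i j lines n (if fixed then 1 else 0)

-- ===== PRECONDITION & SPEC =====
-- number of differing characters between s and t over their common prefix length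
def pvMism (s t : String) : Nat := (s.toList.zip t.toList).countP (fun p => !(p.1 == p.2))

-- mismatch count accumulated by A (1 if fixed) over the first k mirrored pairs
def pvCum (lines : List String) (i j : Int) (fixed : Bool) (k : Nat) : Nat :=
  (if fixed then 1 else 0) +
    ((List.range k).map (fun k' =>
      pvMism ((PySem.List.pyGet? lines (i - (k' : Int))).getD "")
             ((PySem.List.pyGet? lines (j + (k' : Int))).getD ""))).sum

-- both rows exist and the left one is no longer than the right one (pair scanned without IndexError)
def pvClean (lines : List String) (a b : Int) : Bool :=
  match PySem.List.pyGet? lines a with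
  | none => false
  | some l1 =>
    match PySem.List.pyGet? lines b with
    | none => false
    | some l2 => decide (l1.toList.length ≤ l2.toList.length)

-- pair (a,b) raises: a row index out of range, or the left row longer and the overflow column reached before a second mismatch
def pvBad (lines : List String) (a b : Int) (cum : Nat) : Bool :=
  match PySem.List.pyGet? lines a with
  | none => true
  | some l1 =>
    match PySem.List.pyGet? lines b with
    | none => true
    | some l2 => decide (l2.toList.length < l1.toList.length ∧ cum + pvMism l1 l2 ≤ 1)

-- Pre_ excludes EXACTLY the inputs on which the Python A raises IndexError (a row index out of
-- range, or a left row longer than its mirror partner whose overflow column is reached before a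
-- second mismatch stops the scan); A returns normally on every input satisfying Pre_.
-- (The bound min (i+1) (lines.length+1) loses nothing: a raise at some k ≥ 1 needs pair 0 clean,
-- which forces i < lines.length.)
def Pre_check_ref (i : Int) (j : Int) (lines : List String) (n : Int) (fixed : Bool) : Prop :=
  ¬ (0 ≤ i ∧ ∃ k ∈ List.range (min (i.toNat + 1) (lines.length + 1)), j + (k : Int) < n ∧
      (∀ k' ∈ List.range k, pvClean lines (i - (k' : Int)) (j + (k' : Int)) = true) ∧
      pvCum lines i j fixed k ≤ 1 ∧
      pvBad lines (i - (k : Int)) (j + (k : Int)) (pvCum lines i j fixed k) = true)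
instance (i : Int) (j : Int) (lines : List String) (n : Int) (fixed : Bool) : Decidable (Pre_check_ref i j lines n fixed) := by unfold Pre_check_ref; infer_instance

def pvWitness_check_ref : Int × Int × List String × Int × Bool := (1, 2, ["#.", "..", "..", "#."], 4, false)

def Spec_check_ref (i : Int) (j : Int) (lines : List String) (n : Int) (fixed : Bool) (out : Bool) : Prop := out = check_ref_alt i j lines n fixed
instance (i : Int) (j : Int) (lines : List String) (n : Int) (fixed : Bool) (out : Bool) : Decidable (Spec_check_ref i j lines n fixed out) := by unfold Spec_check_ref; infer_instance

-- ===== CLAIM (what is proved, stated in full; the proofs are below) =====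
def Claim_equal_check_ref : Prop := ∀ (i : Int) (j : Int) (lines : List String) (n : Int) (fixed : Bool), Dom_check_ref i j lines n fixed → Pre_check_ref i j lines n fixed → Spec_check_ref i j lines n fixed (check_ref i j lines n fixed)

-- ===== LEMMAS AND PROOFS =====

-- if scanA completes with fixed = true then the changed flag never moved
lemma scanA_ok_fixed (l1 : List Char) : ∀ (l2 : List Char) (c : Int) (changed ch' : Bool),
    scanA l1 l2 c true changed = some (.ok ch') → ch' = changed := by
  induction l1 with
  | nil => intro l2 c changed ch' h; simp [scanA] at h; exact h.symm
  | cons ch rest ih =>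
    intro l2 c changed ch' h
    rw [scanA] at h
    cases hg : PySem.List.pyGet? l2 c with
    | none => rw [hg] at h; simp at h
    | some ch2 =>
      rw [hg] at h
      by_cases he : ch == ch2
      · simp [he] at h; exact ih _ _ _ _ h
      · simp [he] at h

-- countB mirrors scanA with diffs = fixed + changed (never both set); covers the none (IndexError) case too
lemma countB_eq_scanA (l1 : List Char) : ∀ (l2 : List Char) (c : Int) (fixed changed : Bool),
    ¬ (fixed = true ∧ changed = true) →
    countB l1 l2 c ((if fixed then 1 else 0) + (if changed then 1 else 0)) =
      (scanA l1 l2 c fixed changed).map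
        (fun e => match e with
          | .ok ch => .ok ((if fixed then 1 else 0) + (if ch then 1 else 0))
          | .error b => .error b) := by
  induction l1 with
  | nil => intro l2 c fixed changed h; simp [scanA, countB]
  | cons ch rest ih =>
    intro l2 c fixed changed h
    rw [scanA, countB]
    cases hg : PySem.List.pyGet? l2 c with
    | none => simp
    | some ch2 =>
      by_cases he : ch == ch2
      · simp only [he, if_true]
        exact ih _ _ _ _ h
      · cases fixed with
        | true =>
          cases changed with
          | true => exact absurd ⟨rfl, rfl⟩ h
          | false => simp [he]
        | false =>
          cases changed with
          | true => simp [he]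
          | false =>
            have hrec := ih l2 (c + 1) false true (by simp)
            simp only [he] at *
            simpa using hrec

-- main equivalence: the two ports agree on EVERY input (both turn the IndexError paths into false
-- at the same point), by strong induction on the fuel bound
lemma AB_main (lines : List String) (n : Int) : ∀ (m : Nat) (i j : Int) (fixed : Bool),
    (i + 1).toNat ≤ m →
    check_ref i j lines n fixed = loopB i j lines n (if fixed then 1 else 0) := by
  intro m
  induction m with
  | zero =>
    intro i j fixed hm
    have hi : i < 0 := by omega
    rw [check_ref, loopB]
    simp [hi, show ¬ (0 ≤ i) by omega]
    cases fixed <;> simp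
  | succ m ih =>
    intro i j fixed hm
    rw [check_ref, loopB]
    by_cases hend : i < 0 ∨ n ≤ j
    · have hb1 : (i < 0 || n ≤ j) = true := by simp; omega
      have hb2 : (0 ≤ i && j < n) = false := by simp; omega
      simp only [hb1, hb2]
      cases fixed <;> simp
    · push Not at hend
      obtain ⟨hi, hj⟩ := hend
      have hb1 : (i < 0 || n ≤ j) = false := by simp; omega
      have hb2 : (0 ≤ i && j < n) = true := by simp; omega
      simp only [hb1, hb2, Bool.false_eq_true, if_false, if_true]
      cases hg1 : PySem.List.pyGet? lines i with
      | none => rfl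
      | some l1 =>
        cases hg2 : PySem.List.pyGet? lines j with
        | none => rfl
        | some l2 =>
          have hcb := countB_eq_scanA l1.toList l2.toList 0 fixed false (by simp)
          have hz : (if fixed then (1:Int) else 0) + (if false then 1 else 0) = (if fixed then 1 else 0) := by simp
          rw [hz] at hcb
          cases hs : scanA l1.toList l2.toList 0 fixed false with
          | none => rw [hs] at hcb; simp only [Option.map_none] at hcb; simp [hs, hcb]
          | some e =>
            rw [hs] at hcb
            simp only [Option.map_some] at hcb
            cases e with
            | error b =>
              dsimp only at hcb
              simp [hs, hcb]
            | ok changed =>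
              dsimp only at hcb
              have hd : (if fixed then (1:Int) else 0) + (if changed then 1 else 0) =
                  (if (fixed || changed) then 1 else 0) := by
                cases fixed with
                | false => cases changed <;> simp
                | true =>
                  have := scanA_ok_fixed l1.toList l2.toList 0 false changed hs
                  subst this; simp
              rw [hd] at hcb
              have hrec := ih (i - 1) (j + 1) (fixed || changed) (by omega)
              simp only [hs, hcb]
              exact hrec

-- ===== VERDICT (by name: the statement is the Claim_ definition above) =====
theorem check_ref_spec : Claim_equal_check_ref := by
  intro i j lines n fixed _ _
  unfold Spec_check_ref check_ref_alt
  exact AB_main lines n (i + 1).toNat i j fixed (le_refl _)
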